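-- pv_equiv track=rewrite | github.com/hufsice201820454/chatui | backend/src/java_ast_graphrag/ingestion/parser/complexity_analyzer.py | _count_logical_chains
-- ===== SOURCE A (Python) =====
-- def _count_logical_chains(source_text: str) -> int:
--     ops: list[str] = []
--     i = 0
--     while i + 1 < len(source_text):
--         pair = source_text[i : i + 2]
--         if pair == "&&" or pair == "||":
--             ops.append(pair)
--             i += 2
--             continue
--         i += 1
--     if not ops:
--         return 0
--     cnt = 0
--     prev = ""
--     for op in ops:
--         if op != prev:
--             cnt += 1
--             prev = op
--     return cnt
-- ===== SOURCE B (Python) =====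
-- def _count_logical_chains(source_text: str) -> int:
--     # A '&&'/'||' token can never straddle a boundary between two distinct characters,
--     # and a maximal run of k equal characters yields k//2 equal tokens.  So run-length
--     # encode the characters: each maximal run of '&' or '|' of length >= 2 contributes
--     # one operator, and we count it only when it differs from the last recorded one.
--     ops = []
--     i, n = 0, len(source_text)
--     while i < n:
--         c = source_text[i]
--         j = i
--         while j < n and source_text[j] == c:
--             j += 1
--         if c in '&|' and j - i >= 2 and (not ops or ops[-1] != c):
--             ops.append(c)
--         i = j
--     return len(ops)
-- ===== Notes on version B (the rewrite author's own statement) =====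
-- stated objective: alternative
-- what changed: B never scans for or materialises '&&'/'||' tokens: it run-length encodes the characters, using the fact that a token never straddles a boundary between distinct characters and a maximal run of k equal chars yields k//2 equal tokens, so each '&'/'|' run of length >= 2 contributes one operator, counted only when it differs from the last recorded one.
import Mathlib
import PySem

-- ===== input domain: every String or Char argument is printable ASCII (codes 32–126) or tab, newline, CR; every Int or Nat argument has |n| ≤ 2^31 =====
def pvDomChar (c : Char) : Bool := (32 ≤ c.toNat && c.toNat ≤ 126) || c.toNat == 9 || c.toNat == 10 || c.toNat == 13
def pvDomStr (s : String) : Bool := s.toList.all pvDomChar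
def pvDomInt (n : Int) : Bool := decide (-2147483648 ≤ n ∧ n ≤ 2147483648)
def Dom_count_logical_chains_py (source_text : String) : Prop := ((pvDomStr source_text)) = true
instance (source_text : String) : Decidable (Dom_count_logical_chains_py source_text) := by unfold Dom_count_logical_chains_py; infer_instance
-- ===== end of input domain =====

-- B never scans for '&&'/'||' tokens: it run-length encodes the characters (a token never
-- straddles a boundary between distinct chars; a run of k equal chars yields k/2 equal
-- tokens), records one operator per contributing run when it differs from the last
-- recorded one, and returns the count (objective: alternative; same O(n) cost).

-- ===== PORT A =====
-- A's while loop over the cursor i, accumulating ops.  Strings are handled as List Char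
-- (exact for the comparisons involved); `source_text[i : i+2]` with 0 ≤ i is
-- `(s.drop i).take 2`, exact here since i ≥ 0 and Python slices clip at the end.
def aScan (s : List Char) (i : Nat) (ops : List (List Char)) : List (List Char) :=
  if i + 1 < s.length then
    let pair := (s.drop i).take 2
    if pair = ['&','&'] ∨ pair = ['|','|'] then aScan s (i + 2) (ops ++ [pair])
    else aScan s (i + 1) ops
  else ops
termination_by s.length - i

-- the body of A's `for op in ops` loop, state (cnt, prev)
def aStep (st : Int × List Char) (op : List Char) : Int × List Char :=
  if op ≠ st.2 then (st.1 + 1, op) else st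

-- A's `for op in ops` loop; prev = "" initially (here: [])
def aCount (ops : List (List Char)) : Int :=
  (ops.foldl aStep ((0 : Int), ([] : List Char))).1

def count_logical_chains_py (source_text : String) : Int :=
  let ops := aScan source_text.toList 0 []
  if ops = [] then 0 else aCount ops

-- ===== PORT B =====
-- Source B's outer while loop: at position i with current char c, the inner `while j` loop
-- advances j over the maximal run of c (here: takeWhile/dropWhile over the remainder,
-- run length j - i = run.length + 1); append c to ops when c is '&' or '|', the run has
-- length ≥ 2 and ops is empty or ends differently; finally return len(ops).
def bScan (s : List Char) (ops : List Char) : List Char :=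
  match s with
  | [] => ops
  | c :: r =>
      let run := r.takeWhile (fun d => d = c)
      let rest := r.dropWhile (fun d => d = c)
      let ops' := if (c = '&' ∨ c = '|') ∧ 2 ≤ run.length + 1 ∧ ops.getLast? ≠ some c
                  then ops ++ [c] else ops
      bScan rest ops'
termination_by s.length
decreasing_by
  have := List.length_dropWhile_le (fun d => d = c) r
  simp only [List.length_cons]; omega

def count_logical_chains_py_alt (source_text : String) : Int :=
  Int.ofNat (bScan source_text.toList []).length

-- ===== PRECONDITION & SPEC =====
def Spec_count_logical_chains_py (source_text : String) (out : Int) : Prop := out = count_logical_chains_py_alt source_text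
instance (source_text : String) (out : Int) : Decidable (Spec_count_logical_chains_py source_text out) := by unfold Spec_count_logical_chains_py; infer_instance

-- ===== CLAIM (what is proved, stated in full; the proofs are below) =====
def Claim_equal_count_logical_chains_py : Prop := ∀ (source_text : String), Dom_count_logical_chains_py source_text → Spec_count_logical_chains_py source_text (count_logical_chains_py source_text)

-- ===== LEMMAS AND PROOFS =====

-- proof-side model of the token stream A extracts (left-to-right, non-overlapping)
def findall2 : List Char → List (List Char)
  | '&' :: '&' :: r => ['&','&'] :: findall2 r
  | '|' :: '|' :: r => ['|','|'] :: findall2 r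
  | _ :: r => findall2 r
  | [] => []

-- run-count of a token list continuing from key k (A's prev/cnt loop, abstractly)
def groupRest (k : List Char) : List (List Char) → Nat
  | [] => 0
  | a :: l => if a = k then groupRest k l else 1 + groupRest a l

def pyGroupCount : List (List Char) → Nat
  | [] => 0
  | a :: l => 1 + groupRest a l

-- the sequence of operators contributed by the maximal character runs (no collapsing)
def opsSeq : List Char → List Char
  | [] => []
  | c :: r =>
      (if (c = '&' ∨ c = '|') ∧ 2 ≤ (r.takeWhile (fun d => d = c)).length + 1
       then [c] else []) ++ opsSeq (r.dropWhile (fun d => d = c))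
termination_by l => l.length
decreasing_by
  have := List.length_dropWhile_le (fun d => d = c) r
  simp only [List.length_cons]; omega

-- collapsing count over operator chars, continuing from an optional last operator
def chain (k : Option Char) : List Char → Nat
  | [] => 0
  | a :: l => if some a = k then chain k l else 1 + chain (some a) l

-- the token-side key corresponding to an operator-side key
def keyT : Option Char → List Char
  | none => []
  | some c => [c, c]

theorem findall2_skip (c1 c2 : Char) (r : List Char)
    (h1 : ¬ (c1 = '&' ∧ c2 = '&')) (h2 : ¬ (c1 = '|' ∧ c2 = '|')) :
    findall2 (c1 :: c2 :: r) = findall2 (c2 :: r) := by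
  rw [findall2.eq_def]
  split <;> simp_all

theorem findall2_single (c : Char) : findall2 [c] = [] := by
  rw [findall2.eq_def]
  split <;> simp_all [findall2]

-- A's cursor scan produces exactly the findall token list on the remaining suffix.
theorem aScan_eq (s : List Char) (i : Nat) (ops : List (List Char)) :
    aScan s i ops = ops ++ findall2 (s.drop i) := by
  induction hn : s.length - i using Nat.strong_induction_on generalizing i ops with
  | _ n ih =>
    rw [aScan]
    by_cases h : i + 1 < s.length
    · have hi : i < s.length := by omega
      have hd : s.drop i = s[i] :: s.drop (i + 1) := List.drop_eq_getElem_cons hi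
      have hd1 : s.drop (i + 1) = s[i+1] :: s.drop (i + 2) := List.drop_eq_getElem_cons h
      have hpair : (s.drop i).take 2 = [s[i], s[i+1]] := by rw [hd, hd1]; rfl
      simp only [h, if_pos, hpair]
      by_cases hm : ([s[i], s[i+1]] : List Char) = ['&','&'] ∨ ([s[i], s[i+1]] : List Char) = ['|','|']
      · rw [if_pos hm, ih (s.length - (i + 2)) (by omega) (i + 2) _ rfl, hd, hd1]
        rcases hm with hm | hm <;>
          · simp only [List.cons.injEq, and_true] at hm
            obtain ⟨e1, e2⟩ := hm
            simp [findall2, e1, e2]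
      · push Not at hm
        have hA : ¬ (s[i] = '&' ∧ s[i+1] = '&') := by
          rintro ⟨e1, e2⟩; exact hm.1 (by rw [e1, e2])
        have hB : ¬ (s[i] = '|' ∧ s[i+1] = '|') := by
          rintro ⟨e1, e2⟩; exact hm.2 (by rw [e1, e2])
        rw [if_neg (by simpa using hm), ih (s.length - (i + 1)) (by omega) (i + 1) _ rfl, hd, hd1,
          findall2_skip s[i] s[i+1] _ hA hB]
    · rw [if_neg h]
      have hle : (s.drop i).length ≤ 1 := by
        rw [List.length_drop]; omega
      rcases hcase : s.drop i with _ | ⟨c, rest⟩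
      · simp [findall2]
      · rw [hcase] at hle
        simp only [List.length_cons] at hle
        have : rest = [] := List.length_eq_zero_iff.mp (by omega)
        subst this
        simp [findall2_single]

-- every token findall2 produces is one of the two operators (hence nonempty)
theorem findall2_mem (l : List Char) : ∀ x ∈ findall2 l, x = ['&','&'] ∨ x = ['|','|'] := by
  induction l using findall2.induct <;> simp_all [findall2]

-- A's prev/cnt fold from state (c, p) adds exactly groupRest p to c
theorem fold_eq_groupRest (l : List (List Char)) (c : Int) (p : List Char) :
    (l.foldl aStep (c, p)).1 = c + (groupRest p l : Int) := by
  induction l generalizing c p with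
  | nil => simp [groupRest]
  | cons a l ih =>
    rw [List.foldl_cons]
    by_cases h : a = p
    · subst h
      rw [show aStep (c, a) a = (c, a) by simp [aStep], ih, groupRest, if_pos rfl]
    · rw [show aStep (c, p) a = (c + 1, a) by simp [aStep, h], ih, groupRest, if_neg h]
      push_cast; ring

-- dropWhile's head fails the predicate
theorem head?_dropWhile_ne {α : Type} (p : α → Bool) (l : List α) (a : α)
    (h : (l.dropWhile p).head? = some a) : p a = false := by
  induction l with
  | nil => simp [List.dropWhile] at h
  | cons c r ih =>
    by_cases hp : p c
    · rw [List.dropWhile_cons_of_pos hp] at h; exact ih h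
    · rw [List.dropWhile_cons_of_neg hp] at h
      simp only [List.head?_cons, Option.some.injEq] at h
      subst h
      exact Bool.eq_false_iff.mpr hp

-- findall on a maximal run of c followed by something that does not start with c
theorem findall2_replicate (m : Nat) (c : Char) (rest : List Char)
    (hh : rest.head? ≠ some c) :
    findall2 (List.replicate m c ++ rest) =
      (if c = '&' ∨ c = '|' then List.replicate (m / 2) [c, c] else []) ++ findall2 rest := by
  induction m using Nat.strong_induction_on with
  | _ m ih =>
    rcases m with _ | m
    · simp
    rcases m with _ | k
    · rw [show 0 + 1 = 1 from rfl]
      simp only [List.replicate_one, List.singleton_append]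
      rcases rest with _ | ⟨d, r'⟩
      · simp [findall2_single, findall2]
      · have hdc : ¬ d = c := by simpa using hh
        rw [findall2_skip c d r' (by rintro ⟨e1, e2⟩; exact hdc (e2.trans e1.symm))
          (by rintro ⟨e1, e2⟩; exact hdc (e2.trans e1.symm))]
        simp
    · have hrepl : List.replicate (k + 2) c ++ rest = c :: c :: (List.replicate k c ++ rest) := by
        simp [List.replicate_succ]
      rw [hrepl]
      by_cases hP : c = '&' ∨ c = '|'
      · have hf : findall2 (c :: c :: (List.replicate k c ++ rest)) =
            [c, c] :: findall2 (List.replicate k c ++ rest) := by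
          rcases hP with h | h <;> subst h <;> rfl
        rw [hf, ih k (by omega), if_pos hP, if_pos hP,
          show (k + 2) / 2 = k / 2 + 1 by omega, List.replicate_succ]
        simp
      · push Not at hP
        rw [findall2_skip c c _ (by rintro ⟨e, _⟩; exact hP.1 e)
          (by rintro ⟨e, _⟩; exact hP.2 e),
          show c :: (List.replicate k c ++ rest) = List.replicate (k + 1) c ++ rest by
            simp [List.replicate_succ],
          ih (k + 1) (by omega), if_neg (by push Not; exact hP), if_neg (by push Not; exact hP)]

-- counting groups across a nonempty block of equal tokens
theorem groupRest_replicate (n : Nat) (x K : List Char) (L : List (List Char)) :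
    groupRest K (List.replicate (n + 1) x ++ L) = (if x = K then 0 else 1) + groupRest x L := by
  induction n generalizing K with
  | zero =>
    rw [show 0 + 1 = 1 from rfl, List.replicate_one, List.singleton_append, groupRest]
    by_cases hx : x = K
    · subst hx
      rw [if_pos rfl, if_pos rfl]
      omega
    · rw [if_neg hx, if_neg hx]
  | succ n ih =>
    rw [List.replicate_succ, List.cons_append, groupRest]
    by_cases hx : x = K
    · subst hx
      rw [if_pos rfl, if_pos rfl, ih x, if_pos rfl]
    · rw [if_neg hx, if_neg hx, ih x, if_pos rfl]
      omega

-- decompose a list into its first maximal character run and the remainder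
theorem run_decomp (c : Char) (r : List Char) :
    c :: r = List.replicate ((r.takeWhile (fun d => d = c)).length + 1) c ++
      r.dropWhile (fun d => d = c) := by
  rw [List.replicate_succ, List.cons_append]
  congr 1
  have : ∀ b ∈ r.takeWhile (fun d => d = c), b = c := by
    intro b hb
    simpa using List.mem_takeWhile_imp hb
  rw [← List.eq_replicate_of_mem this, List.takeWhile_append_dropWhile]

-- the token-side run count equals the operator-side collapsed count
theorem groupRest_findall2 (l : List Char) (k : Option Char) :
    groupRest (keyT k) (findall2 l) = chain k (opsSeq l) := by
  induction hn : l.length using Nat.strong_induction_on generalizing l k with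
  | _ n ih =>
    rcases l with _ | ⟨c, r⟩
    · simp [findall2, opsSeq, groupRest, chain]
    · have hrest := List.length_dropWhile_le (fun d => d = c) r
      have hh : (r.dropWhile (fun d => d = c)).head? ≠ some c := by
        intro h
        have := head?_dropWhile_ne _ _ _ h
        simp at this
      have hL : groupRest (keyT k) (findall2 (c :: r)) =
          groupRest (keyT k)
            ((if c = '&' ∨ c = '|'
              then List.replicate (((r.takeWhile (fun d => d = c)).length + 1) / 2) [c, c]
              else []) ++ findall2 (r.dropWhile (fun d => d = c))) := by
        rw [run_decomp c r, findall2_replicate _ _ _ hh]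
      rw [hL]
      have hOps : opsSeq (c :: r) =
          (if (c = '&' ∨ c = '|') ∧ 2 ≤ (r.takeWhile (fun d => d = c)).length + 1
           then [c] else []) ++ opsSeq (r.dropWhile (fun d => d = c)) := by
        rw [opsSeq]
      rw [hOps]
      have hlen : (r.dropWhile (fun d => d = c)).length < n := by
        subst hn; simp only [List.length_cons]; omega
      by_cases hP : c = '&' ∨ c = '|'
      · by_cases h2 : 1 ≤ (r.takeWhile (fun d => d = c)).length
        · rw [if_pos hP, if_pos ⟨hP, by omega⟩]
          obtain ⟨q, hq⟩ : ∃ q, ((r.takeWhile (fun d => d = c)).length + 1) / 2 = q + 1 :=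
            ⟨((r.takeWhile (fun d => d = c)).length + 1) / 2 - 1, by omega⟩
          have ihc := ih _ hlen (r.dropWhile (fun d => d = c)) (some c) rfl
          simp only [keyT] at ihc
          rw [hq, groupRest_replicate, ihc]
          have hiff : ([c, c] = keyT k) ↔ (some c = k) := by
            cases k <;> simp [keyT]
          simp only [List.singleton_append]
          have hR : chain k (c :: opsSeq (r.dropWhile (fun d => d = c))) =
              if some c = k then chain k (opsSeq (r.dropWhile (fun d => d = c)))
              else 1 + chain (some c) (opsSeq (r.dropWhile (fun d => d = c))) := by
            simp only [chain]
          rw [hR]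
          by_cases hk : some c = k
          · rw [if_pos (hiff.mpr hk), if_pos hk, ← hk]
            omega
          · rw [if_neg (fun h => hk (hiff.mp h)), if_neg hk]
        · rw [if_pos hP, if_neg (by omega : ¬ ((c = '&' ∨ c = '|') ∧ 2 ≤ (r.takeWhile (fun d => d = c)).length + 1))]
          have h0 : ((r.takeWhile (fun d => d = c)).length + 1) / 2 = 0 := by omega
          rw [h0]
          simpa using ih _ hlen (r.dropWhile (fun d => d = c)) k rfl
      · rw [if_neg hP, if_neg (by tauto)]
        simpa using ih _ hlen (r.dropWhile (fun d => d = c)) k rfl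

-- B's loop counts exactly the collapses of the operator sequence
theorem bScan_len (s : List Char) (ops : List Char) :
    (bScan s ops).length = ops.length + chain ops.getLast? (opsSeq s) := by
  induction hn : s.length using Nat.strong_induction_on generalizing s ops with
  | _ n ih =>
    rcases s with _ | ⟨c, r⟩
    · simp [bScan, opsSeq, chain]
    · rw [bScan]
      have hOps : opsSeq (c :: r) =
          (if (c = '&' ∨ c = '|') ∧ 2 ≤ (r.takeWhile (fun d => d = c)).length + 1
           then [c] else []) ++ opsSeq (r.dropWhile (fun d => d = c)) := by
        rw [opsSeq]
      rw [hOps]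
      have hrest := List.length_dropWhile_le (fun d => d = c) r
      have hlen : (r.dropWhile (fun d => d = c)).length < n := by
        subst hn; simp only [List.length_cons]; omega
      by_cases hPL : (c = '&' ∨ c = '|') ∧ 2 ≤ (r.takeWhile (fun d => d = c)).length + 1
      · by_cases hlast : ops.getLast? ≠ some c
        · rw [if_pos ⟨hPL.1, hPL.2, hlast⟩, if_pos hPL,
            ih _ hlen (r.dropWhile (fun d => d = c)) (ops ++ [c]) rfl,
            List.getLast?_concat]
          have hch : chain ops.getLast? (c :: opsSeq (r.dropWhile (fun d => d = c))) =
              1 + chain (some c) (opsSeq (r.dropWhile (fun d => d = c))) := by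
            simp only [chain]
            rw [if_neg (fun h : some c = ops.getLast? => hlast h.symm)]
          rw [List.singleton_append, hch]
          simp only [List.length_append, List.length_cons, List.length_nil]
          omega
        · push Not at hlast
          rw [if_neg (by simp [hlast]), if_pos hPL,
            ih _ hlen (r.dropWhile (fun d => d = c)) ops rfl]
          have hch : chain ops.getLast? (c :: opsSeq (r.dropWhile (fun d => d = c))) =
              chain ops.getLast? (opsSeq (r.dropWhile (fun d => d = c))) := by
            simp only [chain]
            rw [if_pos hlast.symm]
          rw [List.singleton_append, hch]
      · rw [if_neg (by tauto), if_neg hPL,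
          ih _ hlen (r.dropWhile (fun d => d = c)) ops rfl]
        simp

-- ===== VERDICT (by name: the statement is the Claim_ definition above) =====
theorem count_logical_chains_py_spec : Claim_equal_count_logical_chains_py := by
  intro s _
  unfold Spec_count_logical_chains_py count_logical_chains_py count_logical_chains_py_alt
  have hscan := aScan_eq s.toList 0 []
  simp only [List.drop_zero, List.nil_append] at hscan
  have hB : (bScan s.toList []).length = chain none (opsSeq s.toList) := by
    simpa using bScan_len s.toList []
  have hmain := groupRest_findall2 s.toList none
  rcases hops : findall2 s.toList with _ | ⟨a, t⟩
  · rw [hscan, hops, if_pos rfl, hB, ← hmain, hops]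
    simp [groupRest]
  · rw [hscan, hops, if_neg (by simp)]
    have ha : a ≠ [] := by
      rcases findall2_mem s.toList a (by rw [hops]; exact List.mem_cons_self ..) with h | h <;>
        simp [h]
    unfold aCount
    rw [List.foldl_cons, show aStep (0, []) a = (1, a) by simp [aStep, ha],
      fold_eq_groupRest, hB, ← hmain, hops]
    simp only [keyT, groupRest, if_neg ha, Int.ofNat_eq_natCast]
    push_cast
    ring
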